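-- pv_equiv track=rewrite | github.com/dcprakash/codebase | 2-D/leet/matrix-binary-search-leftmost-column-1.py | leftMostColumnWithOneEfficient
-- ===== SOURCE A (Python) =====
-- def leftMostColumnWithOneEfficient(binaryMatrix):
--     rows = len(binaryMatrix)
--     cols = len(binaryMatrix[0])
--     lefft_most=cols
--     for row in range(rows):
--         lo=0
--         hi=cols-1
--         while lo<hi:
--             mid=(lo+hi)//2
--             # find left most 1
--             if binaryMatrix[row][mid]==0:
--                 lo=mid+1
--             else:
--                 hi=mid
--
--         # if 1 is found in this row
--         if binaryMatrix[row][lo]==1: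
--             lefft_most=min(lefft_most,lo)
--
--     return -1 if lefft_most==cols else lefft_most
-- ===== SOURCE B (Python) =====
-- def leftMostColumnWithOneEfficient(binaryMatrix):
--     # Lockstep ("vectorized") binary search: keep one (lo, hi) interval per row and
--     # halve all still-open intervals together, round by round; then one pass takes
--     # the min over the rows whose landing cell holds a 1.
--     cols = len(binaryMatrix[0])
--     los = [0] * len(binaryMatrix)
--     his = [cols - 1] * len(binaryMatrix)
--     while any(lo < hi for lo, hi in zip(los, his)):
--         for i, row in enumerate(binaryMatrix):
--             lo, hi = los[i], his[i]
--             if lo < hi: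
--                 mid = (lo + hi) // 2
--                 if row[mid] == 0:
--                     los[i] = mid + 1
--                 else:
--                     his[i] = mid
--     best = min((lo for row, lo in zip(binaryMatrix, los) if row[lo] == 1), default=cols)
--     return -1 if best == cols else best
-- ===== Notes on version B (the rewrite author's own statement) =====
-- stated objective: alternative
-- what changed: B replaces A's per-row complete binary searches with a lockstep search: it keeps a vector of (lo,hi) intervals, one per row, and halves all still-open intervals together round by round, then takes min() in a single final pass over the landing indices whose cell is 1, instead of A's running minimum updated inside the row loop.
-- outside the precondition, e.g. on leftMostColumnWithOneEfficient([[5, 3], [3]]): A returns -1, B returns -1; on leftMostColumnWithOneEfficient([[0, 1], [-1], [179]]): A returns 1, B returns 1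
import Mathlib
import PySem

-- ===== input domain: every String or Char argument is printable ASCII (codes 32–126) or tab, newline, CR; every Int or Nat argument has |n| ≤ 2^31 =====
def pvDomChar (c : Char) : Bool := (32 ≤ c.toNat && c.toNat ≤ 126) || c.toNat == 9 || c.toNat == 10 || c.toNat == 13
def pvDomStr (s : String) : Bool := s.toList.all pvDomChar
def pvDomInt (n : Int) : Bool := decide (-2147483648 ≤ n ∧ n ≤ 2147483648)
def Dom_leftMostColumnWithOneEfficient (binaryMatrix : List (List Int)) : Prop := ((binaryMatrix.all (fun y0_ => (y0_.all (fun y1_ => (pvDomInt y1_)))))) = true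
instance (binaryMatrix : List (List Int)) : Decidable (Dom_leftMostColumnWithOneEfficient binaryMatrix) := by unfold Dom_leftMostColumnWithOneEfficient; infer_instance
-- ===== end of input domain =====

-- B runs all rows' interval halvings in lockstep (a vector of (lo,hi) intervals shrunk
-- together round by round, then one final min pass) instead of A's per-row complete
-- binary search with a running minimum (objective: alternative decomposition, same cost).

-- ===== PORT A =====
-- the inner `while lo < hi` binary-search loop of A
def pvBS (row : List Int) (lo hi : Nat) : Nat :=
  if _h : lo < hi then
    let mid := (lo + hi) / 2
    if row.getD mid 0 == 0 then pvBS row (mid + 1) hi else pvBS row lo mid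
  else lo
termination_by hi - lo
decreasing_by all_goals omega

-- the outer `for row in range(rows)` loop of A, carried as recursion on the row index
def pvALoop (bm : List (List Int)) (rows cols r lm : Nat) : Nat :=
  if _h : r < rows then
    let row := bm.getD r []
    let lo := pvBS row 0 (cols - 1)
    pvALoop bm rows cols (r + 1) (if row.getD lo 0 == 1 then min lm lo else lm)
  else lm
termination_by rows - r

def leftMostColumnWithOneEfficient (binaryMatrix : List (List Int)) : Int :=
  let rows := binaryMatrix.length
  let cols := (binaryMatrix.headD []).length   -- binaryMatrix[0]; Pre_ excludes the empty matrix
  let leftMost := pvALoop binaryMatrix rows cols 0 cols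
  if leftMost == cols then -1 else (leftMost : Int)

-- ===== PORT B =====
-- one round of Source B's outer while loop: the `for i, row in enumerate(binaryMatrix)` pass
-- applying one halving step to each still-open interval
def pvRound (bm : List (List Int)) (ls hs : List Nat) : List Nat × List Nat :=
  match bm, ls, hs with
  | row :: bs, lo :: ls', hi :: hs' =>
    let rest := pvRound bs ls' hs'
    if lo < hi then
      let mid := (lo + hi) / 2
      if row.getD mid 0 == 0 then ((mid + 1) :: rest.1, hi :: rest.2)
      else (lo :: rest.1, mid :: rest.2)
    else (lo :: rest.1, hi :: rest.2)
  | _, _, _ => ([], [])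

-- `any(lo < hi for lo, hi in zip(los, his))`
def pvAnyLt (ls hs : List Nat) : Bool := (ls.zip hs).any (fun p => p.1 < p.2)

-- total width of the open intervals: the termination measure of the while loop
def pvGap (ls hs : List Nat) : Nat := ((ls.zip hs).map (fun p => p.2 - p.1)).sum

-- a round never widens the intervals …
theorem pvGap_round_le (bm : List (List Int)) :
    ∀ ls hs, pvGap (pvRound bm ls hs).1 (pvRound bm ls hs).2 ≤ pvGap ls hs := by
  induction bm with
  | nil =>
    intro ls hs
    simp [pvRound, pvGap]
  | cons row bs ih =>
    intro ls hs
    cases ls with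
    | nil => simp [pvRound, pvGap]
    | cons lo ls' =>
      cases hs with
      | nil => simp [pvRound, pvGap]
      | cons hi hs' =>
        have := ih ls' hs'
        rw [pvRound]
        by_cases h : lo < hi
        · simp only [h, if_true]
          by_cases hz : (row.getD ((lo + hi) / 2) 0 == 0) = true
          · simp only [hz, if_true]
            simp only [pvGap, List.zip_cons_cons, List.map_cons, List.sum_cons] at *
            omega
          · have hz' : (row.getD ((lo + hi) / 2) 0 == 0) = false := by simpa using hz
            simp only [hz', Bool.false_eq_true, if_false]
            simp only [pvGap, List.zip_cons_cons, List.map_cons, List.sum_cons] at *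
            omega
        · simp only [h, if_false]
          simp only [pvGap, List.zip_cons_cons, List.map_cons, List.sum_cons] at *
          omega

-- … an open interval means a positive total width …
theorem pvGap_pos_of_anyLt : ∀ ls hs : List Nat, pvAnyLt ls hs = true → 0 < pvGap ls hs := by
  intro ls
  induction ls with
  | nil => intro hs h; simp [pvAnyLt] at h
  | cons lo ls' ih =>
    intro hs h
    cases hs with
    | nil => simp [pvAnyLt] at h
    | cons hi hs' =>
      simp only [pvAnyLt, List.zip_cons_cons, List.any_cons, Bool.or_eq_true, decide_eq_true_eq] at h
      simp only [pvGap, List.zip_cons_cons, List.map_cons, List.sum_cons]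
      rcases h with h | h
      · omega
      · have := ih hs' (by simpa [pvAnyLt] using h)
        simp only [pvGap] at this
        omega

-- … and a round on a state with an open interval strictly shrinks the total width
theorem pvGap_round_lt (bm : List (List Int)) :
    ∀ ls hs, pvAnyLt ls hs = true →
      pvGap (pvRound bm ls hs).1 (pvRound bm ls hs).2 < pvGap ls hs := by
  induction bm with
  | nil =>
    intro ls hs h
    have := pvGap_pos_of_anyLt ls hs h
    simp only [pvRound, pvGap, List.zip_nil_left, List.map_nil, List.sum_nil] at this ⊢
    omega
  | cons row bs ih =>
    intro ls hs h
    cases ls with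
    | nil => simp [pvAnyLt] at h
    | cons lo ls' =>
      cases hs with
      | nil => simp [pvAnyLt] at h
      | cons hi hs' =>
        simp only [pvAnyLt, List.zip_cons_cons, List.any_cons, Bool.or_eq_true,
          decide_eq_true_eq] at h
        rw [pvRound]
        by_cases hlt : lo < hi
        · simp only [hlt, if_true]
          have hle := pvGap_round_le bs ls' hs'
          by_cases hz : (row.getD ((lo + hi) / 2) 0 == 0) = true
          · simp only [hz, if_true]
            simp only [pvGap, List.zip_cons_cons, List.map_cons, List.sum_cons] at *
            omega
          · have hz' : (row.getD ((lo + hi) / 2) 0 == 0) = false := by simpa using hz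
            simp only [hz', Bool.false_eq_true, if_false]
            simp only [pvGap, List.zip_cons_cons, List.map_cons, List.sum_cons] at *
            omega
        · have hany : pvAnyLt ls' hs' = true := by
            rcases h with h | h
            · omega
            · simpa [pvAnyLt] using h
          have := ih ls' hs' hany
          simp only [hlt, if_false]
          simp only [pvGap, List.zip_cons_cons, List.map_cons, List.sum_cons] at *
          omega

-- Source B's outer `while any(...)` loop
def pvBLoop (bm : List (List Int)) (ls hs : List Nat) : List Nat × List Nat :=
  if h : pvAnyLt ls hs = true then
    let r := pvRound bm ls hs
    pvBLoop bm r.1 r.2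
  else (ls, hs)
termination_by pvGap ls hs
decreasing_by exact pvGap_round_lt bm ls hs h

def leftMostColumnWithOneEfficient_alt (binaryMatrix : List (List Int)) : Int :=
  let cols := (binaryMatrix.headD []).length
  let ls := (pvBLoop binaryMatrix
              (List.replicate binaryMatrix.length 0)
              (List.replicate binaryMatrix.length (cols - 1))).1
  -- min((lo for row, lo in zip(binaryMatrix, los) if row[lo] == 1), default=cols)
  let best := (PySem.List.min?
      (((binaryMatrix.zip ls).filter (fun p => p.1.getD p.2 0 == 1)).map (fun p => p.2))
      (fun y => y)).getD cols
  if best == cols then -1 else (best : Int)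

-- ===== PRECONDITION & SPEC =====
-- Pre_ excludes the inputs on which Python A raises IndexError (empty matrix, empty first
-- row, and ragged matrices with a row shorter than the first row — on those, whether A
-- raises depends on the accidental binary-search probe path; where A happens to return
-- there, B returns the same value, see claim.json "cites").
def Pre_leftMostColumnWithOneEfficient (binaryMatrix : List (List Int)) : Prop :=
  binaryMatrix ≠ [] ∧
  0 < (binaryMatrix.headD []).length ∧
  ∀ row ∈ binaryMatrix, (binaryMatrix.headD []).length ≤ row.length

instance (binaryMatrix : List (List Int)) : Decidable (Pre_leftMostColumnWithOneEfficient binaryMatrix) := by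
  unfold Pre_leftMostColumnWithOneEfficient; infer_instance

def pvWitness_leftMostColumnWithOneEfficient : List (List Int) := [[0, 1], [1, 1], [0, 0]]

def Spec_leftMostColumnWithOneEfficient (binaryMatrix : List (List Int)) (out : Int) : Prop := out = leftMostColumnWithOneEfficient_alt binaryMatrix
instance (binaryMatrix : List (List Int)) (out : Int) : Decidable (Spec_leftMostColumnWithOneEfficient binaryMatrix out) := by unfold Spec_leftMostColumnWithOneEfficient; infer_instance

-- ===== CLAIM (what is proved, stated in full; the proofs are below) =====
def Claim_equal_leftMostColumnWithOneEfficient : Prop := ∀ (binaryMatrix : List (List Int)), Dom_leftMostColumnWithOneEfficient binaryMatrix → Pre_leftMostColumnWithOneEfficient binaryMatrix → Spec_leftMostColumnWithOneEfficient binaryMatrix (leftMostColumnWithOneEfficient binaryMatrix)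

-- ===== LEMMAS AND PROOFS =====

-- A's per-row body, as a function (proof-side helper)
def pvFirstOne (cols : Nat) (row : List Int) : Nat :=
  if row.getD (pvBS row 0 (cols - 1)) 0 == 1 then pvBS row 0 (cols - 1) else cols

-- the binary search stays within [lo, max lo hi]
theorem pvBS_le (row : List Int) :
    ∀ n lo hi, hi - lo ≤ n → pvBS row lo hi ≤ max lo hi := by
  intro n
  induction n with
  | zero =>
    intro lo hi hfuel
    rw [pvBS]
    have h : ¬ lo < hi := by omega
    simp only [h, dif_neg, not_false_iff]
    omega
  | succ n ih =>
    intro lo hi hfuel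
    rw [pvBS]
    by_cases h : lo < hi
    · simp only [h, dif_pos]
      by_cases hz : (row.getD ((lo + hi) / 2) 0 == 0) = true
      · simp only [hz, if_true]
        have := ih ((lo + hi) / 2 + 1) hi (by omega)
        omega
      · have hz' : (row.getD ((lo + hi) / 2) 0 == 0) = false := by simpa using hz
        simp only [hz', Bool.false_eq_true, if_false]
        have := ih lo ((lo + hi) / 2) (by omega)
        omega
    · simp only [h, dif_neg, not_false_iff]
      omega

-- the per-row result of A is at most cols
theorem pvFirstOne_le (cols : Nat) (row : List Int) : pvFirstOne cols row ≤ cols := by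
  have h := pvBS_le row (cols - 1) 0 (cols - 1) (by omega)
  unfold pvFirstOne
  split_ifs with hone
  · omega
  · omega

-- A's row loop is the fold of `min · pvFirstOne` over the remaining rows
theorem pvALoop_eq (bm : List (List Int)) (cols : Nat) :
    ∀ n r lm, bm.length - r ≤ n → lm ≤ cols →
      pvALoop bm bm.length cols r lm =
        (bm.drop r).foldl (fun m row => min m (pvFirstOne cols row)) lm := by
  intro n
  induction n with
  | zero =>
    intro r lm hfuel hlm
    have hr : ¬ r < bm.length := by omega
    rw [pvALoop]
    simp only [hr, dif_neg, not_false_iff]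
    rw [List.drop_eq_nil_of_le (by omega), List.foldl_nil]
  | succ n ih =>
    intro r lm hfuel hlm
    rw [pvALoop]
    by_cases hr : r < bm.length
    · simp only [hr, dif_pos]
      have hdrop : bm.drop r = bm[r] :: bm.drop (r + 1) := List.drop_eq_getElem_cons hr
      have hget : bm.getD r [] = bm[r] := List.getD_eq_getElem _ _ hr
      have hstep : (if (bm.getD r []).getD (pvBS (bm.getD r []) 0 (cols - 1)) 0 == 1
            then min lm (pvBS (bm.getD r []) 0 (cols - 1)) else lm)
          = min lm (pvFirstOne cols bm[r]) := by
        rw [hget]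
        unfold pvFirstOne
        by_cases hone : (bm[r].getD (pvBS bm[r] 0 (cols - 1)) 0 == 1) = true
        · simp only [hone, if_true]
        · have hone' : (bm[r].getD (pvBS bm[r] 0 (cols - 1)) 0 == 1) = false := by simpa using hone
          simp only [hone', Bool.false_eq_true, if_false]
          omega
      rw [hstep, ih (r + 1) (min lm (pvFirstOne cols bm[r]))
            (by omega) (by have := pvFirstOne_le cols bm[r]; omega),
          hdrop, List.foldl_cons]
    · simp only [hr, dif_neg, not_false_iff]
      rw [List.drop_eq_nil_of_le (by omega), List.foldl_nil]

-- the per-row meaning of the lockstep state: one round commutes with finishing each search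
theorem pvRound_BS (bm : List (List Int)) :
    ∀ ls hs, ls.length = bm.length → hs.length = bm.length →
      (bm.zip (((pvRound bm ls hs).1).zip ((pvRound bm ls hs).2))).map
          (fun p => pvBS p.1 p.2.1 p.2.2)
        = (bm.zip (ls.zip hs)).map (fun p => pvBS p.1 p.2.1 p.2.2) := by
  induction bm with
  | nil => intro ls hs _ _; simp [pvRound]
  | cons row bs ih =>
    intro ls hs hl hh
    cases ls with
    | nil => simp at hl
    | cons lo ls' =>
      cases hs with
      | nil => simp at hh
      | cons hi hs' =>
        simp only [List.length_cons] at hl hh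
        have ihr := ih ls' hs' (by omega) (by omega)
        rw [pvRound]
        by_cases h : lo < hi
        · simp only [h, if_true]
          by_cases hz : (row.getD ((lo + hi) / 2) 0 == 0) = true
          · simp only [hz, if_true, List.zip_cons_cons, List.map_cons]
            rw [ihr]
            congr 1
            conv_rhs => rw [pvBS]
            simp only [h, dif_pos, hz, if_true]
          · have hz' : (row.getD ((lo + hi) / 2) 0 == 0) = false := by simpa using hz
            simp only [hz', Bool.false_eq_true, if_false, List.zip_cons_cons, List.map_cons]
            rw [ihr]
            congr 1
            conv_rhs => rw [pvBS]
            simp only [h, dif_pos, hz', Bool.false_eq_true, if_false]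
        · simp only [h, if_false, List.zip_cons_cons, List.map_cons]
          rw [ihr]
  
-- a round preserves the vector lengths
theorem pvRound_len (bm : List (List Int)) :
    ∀ ls hs, ls.length = bm.length → hs.length = bm.length →
      (pvRound bm ls hs).1.length = bm.length ∧ (pvRound bm ls hs).2.length = bm.length := by
  induction bm with
  | nil => intro ls hs _ _; simp [pvRound]
  | cons row bs ih =>
    intro ls hs hl hh
    cases ls with
    | nil => simp at hl
    | cons lo ls' =>
      cases hs with
      | nil => simp at hh
      | cons hi hs' =>
        simp only [List.length_cons] at hl hh
        have := ih ls' hs' (by omega) (by omega)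
        rw [pvRound]
        by_cases h : lo < hi
        · simp only [h, if_true]
          by_cases hz : (row.getD ((lo + hi) / 2) 0 == 0) = true
          · simp only [hz, if_true, List.length_cons]; omega
          · have hz' : (row.getD ((lo + hi) / 2) 0 == 0) = false := by simpa using hz
            simp only [hz', Bool.false_eq_true, if_false, List.length_cons]; omega
        · simp only [h, if_false, List.length_cons]; omega

-- once no interval is open, every pending search is already finished
theorem pvBS_done (bm : List (List Int)) :
    ∀ ls hs, ls.length = bm.length → hs.length = bm.length → pvAnyLt ls hs = false →
      (bm.zip (ls.zip hs)).map (fun p => pvBS p.1 p.2.1 p.2.2) = ls := by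
  induction bm with
  | nil =>
    intro ls hs hl _ _
    cases ls with
    | nil => simp
    | cons lo ls' => simp at hl
  | cons row bs ih =>
    intro ls hs hl hh hany
    cases ls with
    | nil => simp at hl
    | cons lo ls' =>
      cases hs with
      | nil => simp at hh
      | cons hi hs' =>
        simp only [List.length_cons] at hl hh
        simp only [pvAnyLt, List.zip_cons_cons, List.any_cons, Bool.or_eq_false_iff,
          decide_eq_false_iff_not] at hany
        simp only [List.zip_cons_cons, List.map_cons]
        rw [ih ls' hs' (by omega) (by omega) (by simpa [pvAnyLt] using hany.2)]
        congr 1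
        rw [pvBS]
        simp only [hany.1, dif_neg, not_false_iff]

-- the lockstep loop finishes every row's binary search
theorem pvBLoop_fst (bm : List (List Int)) :
    ∀ n ls hs, pvGap ls hs ≤ n → ls.length = bm.length → hs.length = bm.length →
      (pvBLoop bm ls hs).1 = (bm.zip (ls.zip hs)).map (fun p => pvBS p.1 p.2.1 p.2.2) := by
  intro n
  induction n with
  | zero =>
    intro ls hs hg hl hh
    have hany : pvAnyLt ls hs = false := by
      by_contra h
      have := pvGap_pos_of_anyLt ls hs (by simpa using h)
      omega
    rw [pvBLoop, dif_neg (by simp [hany])]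
    rw [pvBS_done bm ls hs hl hh hany]
  | succ n ih =>
    intro ls hs hg hl hh
    rw [pvBLoop]
    by_cases hany : pvAnyLt ls hs = true
    · rw [dif_pos hany]
      have hlen := pvRound_len bm ls hs hl hh
      have hlt := pvGap_round_lt bm ls hs hany
      rw [ih (pvRound bm ls hs).1 (pvRound bm ls hs).2 (by omega) hlen.1 hlen.2]
      exact pvRound_BS bm ls hs hl hh
    · rw [dif_neg hany]
      have hany' : pvAnyLt ls hs = false := by simpa using hany
      rw [pvBS_done bm ls hs hl hh hany']

-- with the replicate seeds, the lockstep result is just each row's full search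
theorem pvBLoop_replicate (bm : List (List Int)) (cols : Nat) :
    (bm.zip ((List.replicate bm.length 0).zip (List.replicate bm.length (cols - 1)))).map
        (fun p => pvBS p.1 p.2.1 p.2.2)
      = bm.map (fun row => pvBS row 0 (cols - 1)) := by
  induction bm with
  | nil => simp
  | cons row bs ih =>
    simp only [List.length_cons, List.replicate_succ, List.zip_cons_cons, List.map_cons]
    rw [ih]

-- B's filtered min over landing indices is A's fold of min over pvFirstOne
theorem pvFilterFold (cols : Nat) :
    ∀ (bm : List (List Int)) (a : Nat), a ≤ cols →
      (((bm.zip (bm.map (fun row => pvBS row 0 (cols - 1)))).filter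
          (fun p => p.1.getD p.2 0 == 1)).map (fun p => p.2)).foldl min a
        = bm.foldl (fun m row => min m (pvFirstOne cols row)) a := by
  intro bm
  induction bm with
  | nil => intro a _; simp
  | cons row bs ih =>
    intro a ha
    simp only [List.map_cons, List.zip_cons_cons, List.filter_cons]
    by_cases hone : (row.getD (pvBS row 0 (cols - 1)) 0 == 1) = true
    · simp only [hone, if_true, List.map_cons, List.foldl_cons]
      rw [ih (min a (pvBS row 0 (cols - 1))) (by omega)]
      congr 1
      unfold pvFirstOne
      simp only [hone, if_true]
    · have hone' : (row.getD (pvBS row 0 (cols - 1)) 0 == 1) = false := by simpa using hone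
      simp only [hone', Bool.false_eq_true, if_false, List.foldl_cons]
      rw [ih a ha]
      congr 1
      unfold pvFirstOne
      simp only [hone', Bool.false_eq_true, if_false]
      omega

-- Python's min(…, default=cols) over values ≤ cols is the fold of min seeded with cols
theorem pvMin?_getD (xs : List Nat) (a : Nat) (hle : ∀ x ∈ xs, x ≤ a) :
    (PySem.List.min? xs (fun y => y)).getD a = xs.foldl min a := by
  cases xs with
  | nil => rfl
  | cons x t =>
    rw [PySem.List.min?_id_cons, Option.getD_some, List.foldl_cons]
    have hx : x ≤ a := hle x List.mem_cons_self
    have : min a x = x := by omega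
    rw [this]

-- ===== VERDICT (by name: the statement is the Claim_ definition above) =====
theorem leftMostColumnWithOneEfficient_spec : Claim_equal_leftMostColumnWithOneEfficient := by
  intro bm _hdom _hpre
  unfold Spec_leftMostColumnWithOneEfficient
  unfold leftMostColumnWithOneEfficient leftMostColumnWithOneEfficient_alt
  set cols := (bm.headD []).length with hcdef
  have hA := pvALoop_eq bm cols bm.length 0 cols (by omega) (le_refl _)
  simp only [List.drop_zero] at hA
  have hls : (pvBLoop bm (List.replicate bm.length 0) (List.replicate bm.length (cols - 1))).1
      = bm.map (fun row => pvBS row 0 (cols - 1)) := by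
    rw [pvBLoop_fst bm (pvGap (List.replicate bm.length 0) (List.replicate bm.length (cols - 1)))
          _ _ (le_refl _) (by simp) (by simp)]
    exact pvBLoop_replicate bm cols
  have hB : (PySem.List.min?
        (((bm.zip (bm.map (fun row => pvBS row 0 (cols - 1)))).filter
            (fun p => p.1.getD p.2 0 == 1)).map (fun p => p.2)) (fun y => y)).getD cols
      = bm.foldl (fun m row => min m (pvFirstOne cols row)) cols := by
    rw [pvMin?_getD _ cols (by
      intro x hx
      rcases List.mem_map.mp hx with ⟨p, hp, rfl⟩
      rcases List.of_mem_zip (List.mem_filter.mp hp).1 with ⟨_, hmem⟩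
      rcases List.mem_map.mp hmem with ⟨row, _, hrow⟩
      have := pvBS_le row (cols - 1) 0 (cols - 1) (by omega)
      omega)]
    exact pvFilterFold cols bm cols (le_refl _)
  simp only [hls, hB, hA]
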